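-- pv_equiv track=rewrite | github.com/milamarcheva/maturational_grammar_induction | scripts/run_staged_vb_old.py | order_rules_nonlex_then_lex
-- ===== SOURCE A (Python) =====
-- from typing import Dict, Iterable, List, Optional, Tuple
--
-- Rule = Tuple[str, List[str], str]
--
-- def order_rules_nonlex_then_lex(rules: List[Rule]) -> List[Rule]:
--     lhs_set = {lhs for lhs, _, _ in rules}
--     nonlex: List[Rule] = []
--     lex: List[Rule] = []
--     for lhs, rhs, raw in rules:
--         if len(rhs) == 1 and rhs[0] not in lhs_set:
--             lex.append((lhs, rhs, raw))
--         else: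
--             nonlex.append((lhs, rhs, raw))
--     return nonlex + lex
-- ===== SOURCE B (Python) =====
-- def order_rules_nonlex_then_lex(rules):
--     lhs_set = {lhs for lhs, _, _ in rules}
--     return sorted(rules, key=lambda r: 1 if (len(r[1]) == 1 and r[1][0] not in lhs_set) else 0)
-- ===== Notes on version B (the rewrite author's own statement) =====
-- stated objective: alternative
-- what changed: Replaces the two-accumulator partition loop with a single stable sort keyed 0 (non-lexical) / 1 (lexical), relying on sort stability to preserve each group's relative order.
import Mathlib
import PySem

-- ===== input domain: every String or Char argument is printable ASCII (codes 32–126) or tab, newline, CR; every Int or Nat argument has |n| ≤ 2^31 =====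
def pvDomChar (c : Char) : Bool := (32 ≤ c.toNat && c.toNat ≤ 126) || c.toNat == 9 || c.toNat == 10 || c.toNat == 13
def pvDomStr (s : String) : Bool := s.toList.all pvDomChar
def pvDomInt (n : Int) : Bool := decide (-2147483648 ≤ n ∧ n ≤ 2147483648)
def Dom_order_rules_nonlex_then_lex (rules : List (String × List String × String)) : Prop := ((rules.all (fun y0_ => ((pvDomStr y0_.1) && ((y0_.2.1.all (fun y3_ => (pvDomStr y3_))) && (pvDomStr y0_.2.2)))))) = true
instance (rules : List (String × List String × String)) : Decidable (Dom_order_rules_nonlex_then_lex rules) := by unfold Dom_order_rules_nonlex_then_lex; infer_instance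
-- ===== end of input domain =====

-- B replaces A's two-accumulator partition loop by one stable sort with a 0/1 key; same return value, alternative decomposition (not faster).


-- 'len(rhs) == 1 and rhs[0] not in lhs_set' — the lexical-rule test shared by both ports
def pvIsLex (lhs_set : PySem.Set String) (r : String × List String × String) : Bool :=
  match r.2.1 with
  | [x] => !(lhs_set.contains x)
  | _ => false

-- ===== PORT A =====
def order_rules_nonlex_then_lex (rules : List (String × List String × String)) : List (String × List String × String) :=
  let lhs_set := PySem.Set.ofList (rules.map (fun r => r.1))
  let res := rules.foldl
    (fun (acc : List (String × List String × String) × List (String × List String × String)) r =>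
      if pvIsLex lhs_set r then (acc.1, acc.2 ++ [r]) else (acc.1 ++ [r], acc.2))
    ([], [])
  res.1 ++ res.2

-- ===== PORT B =====
def order_rules_nonlex_then_lex_alt (rules : List (String × List String × String)) : List (String × List String × String) :=
  let lhs_set := PySem.Set.ofList (rules.map (fun r => r.1))
  PySem.List.sorted rules (fun r => if pvIsLex lhs_set r then (1 : Int) else 0) false

-- ===== PRECONDITION & SPEC =====
def Spec_order_rules_nonlex_then_lex (rules : List (String × List String × String)) (out : List (String × List String × String)) : Prop := out = order_rules_nonlex_then_lex_alt rules
instance (rules : List (String × List String × String)) (out : List (String × List String × String)) : Decidable (Spec_order_rules_nonlex_then_lex rules out) := by unfold Spec_order_rules_nonlex_then_lex; infer_instance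

-- ===== CLAIM (what is proved, stated in full; the proofs are below) =====
def Claim_equal_order_rules_nonlex_then_lex : Prop := ∀ (rules : List (String × List String × String)), Dom_order_rules_nonlex_then_lex rules → Spec_order_rules_nonlex_then_lex rules (order_rules_nonlex_then_lex rules)

-- ===== LEMMAS AND PROOFS =====

-- A's loop, generalized over the accumulators, is a filter-based partition.
theorem foldA_eq {α : Type} (p : α → Bool) :
    ∀ (rules : List α) (N L : List α),
      rules.foldl (fun (acc : List α × List α) r =>
        if p r then (acc.1, acc.2 ++ [r]) else (acc.1 ++ [r], acc.2)) (N, L)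
      = (N ++ rules.filter (fun r => !p r), L ++ rules.filter p) := by
  intro rules
  induction rules with
  | nil => intro N L; simp
  | cons r rest ih =>
    intro N L
    by_cases h : p r = true
    · simp [List.foldl, h, ih]
    · simp at h
      simp [List.foldl, h, ih]

theorem insertBy_append_not {α : Type} (before : α → α → Bool) (x : α) :
    ∀ (N L : List α), (∀ a ∈ N, before x a = false) →
      PySem.List.insertBy before x (N ++ L) = N ++ PySem.List.insertBy before x L := by
  intro N
  induction N with
  | nil => intro L _; simp
  | cons a N ih =>
    intro L h
    have ha := h a (List.mem_cons_self ..)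
    simp [PySem.List.insertBy, ha, ih L (fun b hb => h b (List.mem_cons_of_mem _ hb))]

theorem insertBy_all_true {α : Type} (p : α → Bool) (x : α) (hx : p x = false) :
    ∀ (L : List α), (∀ a ∈ L, p a = true) →
      PySem.List.insertBy (fun a b => decide ((if p a then (1:Int) else 0) < (if p b then (1:Int) else 0))) x L = x :: L := by
  intro L hL
  cases L with
  | nil => simp [PySem.List.insertBy]
  | cons y ys =>
    have hy := hL y (List.mem_cons_self ..)
    simp [PySem.List.insertBy, hx, hy]

-- B's stable insertion sort, with its 0/1 key, performs the same partition.
theorem foldB_eq {α : Type} (p : α → Bool) :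
    ∀ (rules : List α) (N L : List α),
      (∀ a ∈ N, p a = false) → (∀ a ∈ L, p a = true) →
      rules.foldl (fun acc x =>
        PySem.List.insertBy (fun a b => decide ((if p a then (1:Int) else 0) < (if p b then (1:Int) else 0))) x acc) (N ++ L)
      = (N ++ rules.filter (fun r => !p r)) ++ (L ++ rules.filter p) := by
  intro rules
  induction rules with
  | nil => intro N L _ _; simp
  | cons r rest ih =>
    intro N L hN hL
    by_cases h : p r = true
    · have hins : PySem.List.insertBy (fun a b => decide ((if p a then (1:Int) else 0) < (if p b then (1:Int) else 0))) r (N ++ L) = (N ++ L) ++ [r] := by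
        apply PySem.List.insertBy_of_forall_not_before
        intro y _
        simp [h]
        split <;> omega
      have := ih N (L ++ [r]) hN (by
        intro a ha
        rcases List.mem_append.mp ha with ha | ha
        · exact hL a ha
        · simp at ha; subst ha; exact h)
      simp only [List.foldl, hins, List.append_assoc] at this ⊢
      rw [this]
      simp [h]
    · simp at h
      have hins : PySem.List.insertBy (fun a b => decide ((if p a then (1:Int) else 0) < (if p b then (1:Int) else 0))) r (N ++ L) = (N ++ [r]) ++ L := by
        rw [insertBy_append_not _ _ N L (by intro a ha; simp [h, hN a ha])]
        rw [insertBy_all_true p r h L hL]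
        simp
      have := ih (N ++ [r]) L (by
        intro a ha
        rcases List.mem_append.mp ha with ha | ha
        · exact hN a ha
        · simp at ha; subst ha; exact h) hL
      simp only [List.foldl, hins] at this ⊢
      rw [this]
      simp [h]

-- ===== VERDICT (by name: the statement is the Claim_ definition above) =====
theorem order_rules_nonlex_then_lex_spec : Claim_equal_order_rules_nonlex_then_lex := by
  intro rules _
  show order_rules_nonlex_then_lex rules = order_rules_nonlex_then_lex_alt rules
  simp only [order_rules_nonlex_then_lex, order_rules_nonlex_then_lex_alt]
  rw [PySem.List.sorted_eq_foldl_insertBy]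
  rw [foldA_eq (pvIsLex (PySem.Set.ofList (rules.map (fun r => r.1)))) rules [] []]
  have hB := foldB_eq (pvIsLex (PySem.Set.ofList (rules.map (fun r => r.1)))) rules [] [] (by simp) (by simp)
  simp only [List.nil_append] at hB
  rw [hB]
  simp
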